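-- pv_equiv track=rewrite | github.com/gerlacdt/coding_challenges | daily_coding_challenges/p381.py | getBlocksHex
-- ===== SOURCE A (Python) =====
-- def getBlocksHex(word):
--     hex_string = format(int(word, 16), "b")
--     current = 0
--     blocks = []
--     for i in range(24, len(hex_string) + 1, 24):
--         blocks.append(hex_string[current:i])
--         current = i
--
--     if current < len(hex_string):
--         s = hex_string[current : len(hex_string)]
--         n = len(s)
--         if n % 8 and n < 8:
--             s += "0" * (8 - n)
--         elif n % 8 and n < 16:
--             s += "0" * (16 - n)
--         elif n % 8 and n < 24:
--             s += "0" * (24 - n)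
--         blocks.append(s)
--
--     return blocks
-- ===== SOURCE B (Python) =====
-- def getBlocksHex(word):
--     hex_string = format(int(word, 16), "b")
--     if len(hex_string) % 8:
--         hex_string += "0" * (8 - len(hex_string) % 8)
--     return [hex_string[i:i + 24] for i in range(0, len(hex_string), 24)]
-- ===== Notes on version B (the rewrite author's own statement) =====
-- stated objective: simpler
-- what changed: B pads the whole binary string to the next multiple of 8 up front and then does one uniform 24-char chunking pass, replacing A's full-block loop plus a separate tail pass with a three-way elif padding branch.
import Mathlib
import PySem

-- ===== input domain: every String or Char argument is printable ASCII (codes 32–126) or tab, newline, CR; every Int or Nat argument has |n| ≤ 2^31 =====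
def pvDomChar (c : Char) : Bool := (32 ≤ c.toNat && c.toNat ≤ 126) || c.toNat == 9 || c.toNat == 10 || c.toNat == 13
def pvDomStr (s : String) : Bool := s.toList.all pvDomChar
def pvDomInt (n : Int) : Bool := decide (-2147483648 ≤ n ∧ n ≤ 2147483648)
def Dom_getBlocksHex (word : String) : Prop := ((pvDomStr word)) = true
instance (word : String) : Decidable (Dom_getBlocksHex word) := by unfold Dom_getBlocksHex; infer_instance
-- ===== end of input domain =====

-- B pads the whole binary string to the next multiple of 8 up front and then does one
-- uniform 24-char chunking pass, instead of A's full-block loop plus a separate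
-- three-way-padded tail pass (objective: simpler).
-- String slicing/concatenation is ported exactly over List Char (String.ofList/toList).

-- ===== PORT A =====
def getBlocksHex (word : String) : List String :=
  match PySem.Int.ofStrBase? word 16 with
  | none => []    -- unreachable under Pre_ (int(word, 16) raises ValueError)
  | some m =>
    let cs := (PySem.Int.toBin m).toList          -- hex_string = format(int(word,16),'b')
    let st := (PySem.List.pyRange 24 ((cs.length : Int) + 1) 24).foldl
      (fun (st : Int × List String) (i : Int) =>
        (i, st.2 ++ [String.ofList (PySem.List.slice cs (some st.1) (some i))]))
      (0, [])
    if st.1 < (cs.length : Int) then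
      let s := PySem.List.slice cs (some st.1) (some (cs.length : Int))
      let n := s.length
      let s :=
        if n % 8 ≠ 0 ∧ n < 8 then s ++ List.replicate (8 - n) '0'
        else if n % 8 ≠ 0 ∧ n < 16 then s ++ List.replicate (16 - n) '0'
        else if n % 8 ≠ 0 ∧ n < 24 then s ++ List.replicate (24 - n) '0'
        else s
      st.2 ++ [String.ofList s]
    else st.2

-- ===== PORT B =====
def getBlocksHex_alt (word : String) : List String :=
  match PySem.Int.ofStrBase? word 16 with
  | none => []    -- unreachable under Pre_ (int(word, 16) raises ValueError)
  | some m =>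
    let cs0 := (PySem.Int.toBin m).toList
    let cs := if cs0.length % 8 ≠ 0 then cs0 ++ List.replicate (8 - cs0.length % 8) '0' else cs0
    (PySem.List.pyRange 0 (cs.length : Int) 24).map
      (fun i => String.ofList (PySem.List.slice cs (some i) (some (i + 24))))

-- ===== PRECONDITION & SPEC =====
-- Pre_ excludes exactly the words on which int(word, 16) raises ValueError (both A and B raise there).
def Pre_getBlocksHex (word : String) : Prop := (PySem.Int.ofStrBase? word 16).isSome
instance (word : String) : Decidable (Pre_getBlocksHex word) := by unfold Pre_getBlocksHex; infer_instance
def pvWitness_getBlocksHex : String := "1f"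

def Spec_getBlocksHex (word : String) (out : List String) : Prop := out = getBlocksHex_alt word
instance (word : String) (out : List String) : Decidable (Spec_getBlocksHex word out) := by unfold Spec_getBlocksHex; infer_instance

-- ===== CLAIM (what is proved, stated in full; the proofs are below) =====
def Claim_equal_getBlocksHex : Prop := ∀ (word : String), Dom_getBlocksHex word → Pre_getBlocksHex word → Spec_getBlocksHex word (getBlocksHex word)

-- ===== LEMMAS AND PROOFS =====

-- A's full-block loop, in closed form: after m iterations current = 24*m and the
-- blocks are the m full 24-char chunks.
theorem foldA_closed (cs : List Char) (m : Nat) :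
    (List.range m).foldl
      (fun (st : Int × List String) (k : Nat) =>
        ((24 : Int) + 24 * (k : Int),
         st.2 ++ [String.ofList (PySem.List.slice cs (some st.1) (some ((24 : Int) + 24 * (k : Int))))]))
      (0, [])
    = (((24 * m : Nat) : Int),
       (List.range m).map (fun k => String.ofList ((cs.drop (24 * k)).take 24))) := by
  induction m with
  | zero => simp
  | succ m ih =>
    rw [List.range_succ, List.foldl_append, ih, List.map_append]
    simp only [List.foldl_cons, List.foldl_nil, List.map_cons, List.map_nil]
    rw [Prod.mk.injEq]
    refine ⟨by push_cast; ring, ?_⟩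
    congr 2
    have h1 : ((24 : Int) + 24 * (m : Int)) = (((24 * m + 24 : Nat) : Int)) := by push_cast; ring
    have h2 : (((24 * m : Nat) : Int)) + ((24 : Nat) : Int) = (((24 * m + 24 : Nat) : Int)) := by
      push_cast; ring
    rw [h1, ← h2, PySem.List.slice_natCast_add]

-- pyRange with step 24, rewritten to a List.range of Nat indices
theorem pyRangeA (L : Nat) :
    PySem.List.pyRange 24 ((L : Int) + 1) 24
    = (List.range (L / 24)).map (fun (k : Nat) => (24 : Int) + 24 * (k : Int)) := by
  rw [PySem.List.pyRange_of_pos _ _ (by norm_num)]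
  have hc : ((if (24 : Int) < (L : Int) + 1 then (((L : Int) + 1 - 24 + 24 - 1) / 24).toNat else 0))
      = L / 24 := by split_ifs <;> omega
  rw [hc]

theorem pyRangeB (L : Nat) :
    PySem.List.pyRange 0 (L : Int) 24
    = (List.range ((L + 23) / 24)).map (fun (k : Nat) => (0 : Int) + 24 * (k : Int)) := by
  rw [PySem.List.pyRange_of_pos _ _ (by norm_num)]
  have hc : ((if (0 : Int) < (L : Int) then (((L : Int) - 0 + 24 - 1) / 24).toNat else 0))
      = (L + 23) / 24 := by split_ifs <;> omega
  rw [hc]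

theorem slice_chunk (cs : List Char) (j : Nat) :
    PySem.List.slice cs (some ((j : Nat) : Int)) (some (((j : Nat) : Int) + 24))
    = (cs.drop j).take 24 := by
  have h : (((j : Nat) : Int) + 24) = (((j : Nat) : Int) + ((24 : Nat) : Int)) := by push_cast; ring
  rw [h, PySem.List.slice_natCast_add]

-- the q full blocks are unchanged by padding appended at the end
theorem full_blocks_pad (cs z : List Char) :
    (List.range (cs.length / 24)).map (fun k => String.ofList (((cs ++ z).drop (24 * k)).take 24))
    = (List.range (cs.length / 24)).map (fun k => String.ofList ((cs.drop (24 * k)).take 24)) := by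
  apply List.map_congr_left
  intro k hk
  have hk' : k < cs.length / 24 := List.mem_range.mp hk
  congr 1
  rw [List.drop_append, List.take_append_of_le_length (by rw [List.length_drop]; omega)]

-- the core list-level fact: A's chunk-then-pad-the-tail equals B's pad-then-chunk
theorem chunks_eq (cs : List Char) :
    (if 24 * (cs.length / 24) < cs.length then
       (List.range (cs.length / 24)).map (fun k => String.ofList ((cs.drop (24 * k)).take 24)) ++
         [String.ofList
           (let s := cs.drop (24 * (cs.length / 24))
            let n := s.length
            if n % 8 ≠ 0 ∧ n < 8 then s ++ List.replicate (8 - n) '0'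
            else if n % 8 ≠ 0 ∧ n < 16 then s ++ List.replicate (16 - n) '0'
            else if n % 8 ≠ 0 ∧ n < 24 then s ++ List.replicate (24 - n) '0'
            else s)]
     else (List.range (cs.length / 24)).map (fun k => String.ofList ((cs.drop (24 * k)).take 24)))
    =
    (let cs' := if cs.length % 8 ≠ 0 then cs ++ List.replicate (8 - cs.length % 8) '0' else cs
     (List.range ((cs'.length + 23) / 24)).map
       (fun k => String.ofList ((cs'.drop (24 * k)).take 24))) := by
  simp only [List.length_drop]
  by_cases hr : cs.length % 24 = 0
  · -- no tail: A appends nothing, B pads nothing (cs.length % 8 = 0) and chunks exactly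
    rw [if_neg (by omega), if_neg (show ¬ cs.length % 8 ≠ 0 by omega)]
    have hcount : (cs.length + 23) / 24 = cs.length / 24 := by omega
    rw [hcount]
  · rw [if_pos (by omega)]
    by_cases h8 : cs.length % 8 = 0
    · -- tail length is 8 or 16: neither side pads
      rw [if_neg (show ¬ cs.length % 8 ≠ 0 by omega)]
      have hcount : (cs.length + 23) / 24 = cs.length / 24 + 1 := by omega
      rw [hcount, List.range_succ, List.map_append, List.map_singleton]
      congr 1
      simp only [show cs.length - 24 * (cs.length / 24) = cs.length % 24 from by omega]
      rw [if_neg (by omega), if_neg (by omega), if_neg (by omega)]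
      congr 2
      exact (List.take_of_length_le (by rw [List.length_drop]; omega)).symm
    · -- tail % 8 ≠ 0: B pads the whole string by p = 8 - cs.length % 8, A pads the tail the same
      rw [if_pos (show cs.length % 8 ≠ 0 from h8)]
      have hplen : (cs ++ List.replicate (8 - cs.length % 8) '0').length
          = cs.length + (8 - cs.length % 8) := by
        rw [List.length_append, List.length_replicate]
      rw [hplen]
      have hcount : (cs.length + (8 - cs.length % 8) + 23) / 24 = cs.length / 24 + 1 := by omega
      rw [hcount, List.range_succ, List.map_append, List.map_singleton, full_blocks_pad]
      simp only [show cs.length - 24 * (cs.length / 24) = cs.length % 24 from by omega]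
      congr 1
      -- the tail block
      rw [List.drop_append, show 24 * (cs.length / 24) - cs.length = 0 by omega, List.drop_zero,
        List.take_of_length_le (by rw [List.length_append, List.length_drop, List.length_replicate]; omega)]
      congr 1
      by_cases c1 : cs.length % 24 % 8 ≠ 0 ∧ cs.length % 24 < 8
      · rw [if_pos c1, show 8 - cs.length % 24 = 8 - cs.length % 8 from by omega]
      · rw [if_neg c1]
        by_cases c2 : cs.length % 24 % 8 ≠ 0 ∧ cs.length % 24 < 16
        · rw [if_pos c2, show 16 - cs.length % 24 = 8 - cs.length % 8 from by omega]
        · rw [if_neg c2]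
          rw [if_pos (show cs.length % 24 % 8 ≠ 0 ∧ cs.length % 24 < 24 from by omega),
            show 24 - cs.length % 24 = 8 - cs.length % 8 from by omega]
-- ===== VERDICT (by name: the statement is the Claim_ definition above) =====
theorem getBlocksHex_spec : Claim_equal_getBlocksHex := by
  intro word _ _
  unfold Spec_getBlocksHex getBlocksHex getBlocksHex_alt
  cases PySem.Int.ofStrBase? word 16 with
  | none => rfl
  | some m =>
    simp only []
    set cs := (PySem.Int.toBin m).toList with hcs
    -- rewrite A's loop to its closed form
    rw [pyRangeA cs.length, List.foldl_map, foldA_closed]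
    -- rewrite B's comprehension to Nat chunks
    rw [pyRangeB, List.map_map]
    have hB : ∀ (N : Nat) (zs : List Char), (List.range N).map
          ((fun i => String.ofList (PySem.List.slice zs (some i) (some (i + 24)))) ∘
            (fun (k : Nat) => (0 : Int) + 24 * (k : Int)))
        = (List.range N).map (fun k => String.ofList ((zs.drop (24 * k)).take 24)) := by
      intro N zs
      apply List.map_congr_left
      intro k _
      simp only [Function.comp_apply, zero_add]
      have h24 : (24 * (k : Int)) = (((24 * k : Nat) : Int)) := by push_cast; ring
      rw [h24, slice_chunk]
    rw [hB]
    -- bridge A's Int-side tail slice and condition to the Nat form, then use chunks_eq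
    have hslice : PySem.List.slice cs (some (((24 * (cs.length / 24) : Nat) : Int)))
          (some ((cs.length : Nat) : Int))
        = cs.drop (24 * (cs.length / 24)) := by
      rw [PySem.List.slice_natCast]
      apply List.take_of_length_le
      rw [List.length_drop]
    rw [hslice]
    simp only [Nat.cast_lt]
    exact chunks_eq cs
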